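-- pv_equiv track=rewrite | github.com/aa8a7b82/mif | cham/arx.py | patterns_mergeable
-- ===== SOURCE A (Python) =====
-- def patterns_mergeable(pi, pj):
--     for i, (a, b) in enumerate(zip(pi, pj)):
--         if a > b:
--             a, b = b, a
--         if (a, b) == ("0", "1") :
--             if pi[i+1:] == pj[i+1:]:
--                 assert pi[:i] == pj[:i]
--                 return pi[:i] + "*" + pi[i+1:]
--             return
--
--         if a != b:
--             return
--     return
-- ===== SOURCE B (Python) =====
-- def patterns_mergeable(pi, pj):
--     if len(pi) != len(pj):
--         return None
--     diffs = [(k, a, b) for k, (a, b) in enumerate(zip(pi, pj)) if a != b]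
--     if len(diffs) != 1:
--         return None
--     i, a, b = diffs[0]
--     if (a, b) in (("0", "1"), ("1", "0")):
--         return pi[:i] + "*" + pi[i+1:]
--     return None
-- ===== Notes on version B (the rewrite author's own statement) =====
-- stated objective: simpler
-- what changed: Replaces A's early-exit scan with suffix-slice comparison at the first difference by an up-front length guard plus collecting all differing positions and a constant-size check that there is exactly one, a '0'/'1' pair.
import Mathlib
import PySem

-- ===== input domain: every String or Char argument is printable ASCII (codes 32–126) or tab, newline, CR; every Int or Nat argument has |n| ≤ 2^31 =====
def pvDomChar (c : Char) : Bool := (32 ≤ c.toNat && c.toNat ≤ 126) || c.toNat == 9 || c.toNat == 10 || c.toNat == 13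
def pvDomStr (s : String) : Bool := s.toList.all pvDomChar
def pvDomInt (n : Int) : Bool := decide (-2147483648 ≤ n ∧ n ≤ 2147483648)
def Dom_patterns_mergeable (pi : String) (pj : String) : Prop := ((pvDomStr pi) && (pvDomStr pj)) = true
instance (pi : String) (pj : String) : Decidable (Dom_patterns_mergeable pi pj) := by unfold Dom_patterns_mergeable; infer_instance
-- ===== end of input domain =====

-- B replaces A's early-exit scan (suffix-slice comparison at the first difference) by a length
-- guard plus collecting ALL differing positions and checking there is exactly one: simpler.

-- ===== PORT A =====
-- the loop: for i, (a, b) in enumerate(zip(pi, pj)): …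
-- (the Python 'assert pi[:i] == pj[:i]' can never fail — every earlier pair was equal — so A raises nowhere)
def pmLoopA (pi pj : String) : List (Int × (Char × Char)) → Option String
  | [] => none
  | (i, ab) :: rest =>
    let p := if ab.1 > ab.2 then (ab.2, ab.1) else (ab.1, ab.2)
    if p.1 = '0' ∧ p.2 = '1' then
      if PySem.List.slice pi.toList (some (i+1)) none = PySem.List.slice pj.toList (some (i+1)) none then
        some (String.ofList (PySem.List.slice pi.toList none (some i) ++ '*' ::
              PySem.List.slice pi.toList (some (i+1)) none))
      else none
    else if p.1 ≠ p.2 then none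
    else pmLoopA pi pj rest

def patterns_mergeable (pi : String) (pj : String) : Option String :=
  pmLoopA pi pj (PySem.List.enumerate (pi.toList.zip pj.toList) 0)

-- ===== PORT B =====
-- tail of B after diffs is built: len(diffs) != 1 check, unpack diffs[0], constant-size branch
def pmFinishB (pi : String) (diffs : List (Int × (Char × Char))) : Option String :=
  if diffs.length ≠ 1 then none
  else
    match diffs.head? with
    | some (i, ab) =>
        if (ab.1 = '0' ∧ ab.2 = '1') ∨ (ab.1 = '1' ∧ ab.2 = '0') then
          some (String.ofList (PySem.List.slice pi.toList none (some i) ++ '*' ::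
                PySem.List.slice pi.toList (some (i+1)) none))
        else none
    | none => none

def patterns_mergeable_alt (pi : String) (pj : String) : Option String :=
  if PySem.Str.len pi ≠ PySem.Str.len pj then none
  else
    pmFinishB pi ((PySem.List.enumerate (pi.toList.zip pj.toList) 0).filter
      (fun x => x.2.1 ≠ x.2.2))

-- ===== PRECONDITION & SPEC =====
def Spec_patterns_mergeable (pi : String) (pj : String) (out : Option String) : Prop := out = patterns_mergeable_alt pi pj
instance (pi : String) (pj : String) (out : Option String) : Decidable (Spec_patterns_mergeable pi pj out) := by unfold Spec_patterns_mergeable; infer_instance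

-- ===== CLAIM (what is proved, stated in full; the proofs are below) =====
def Claim_equal_patterns_mergeable : Prop := ∀ (pi : String) (pj : String), Dom_patterns_mergeable pi pj → Spec_patterns_mergeable pi pj (patterns_mergeable pi pj)

-- ===== LEMMAS AND PROOFS =====

-- common specification: merge the two character lists
def pmMerge : List Char → List Char → Option (List Char)
  | a :: t1, b :: t2 =>
    if (a = '0' ∧ b = '1') ∨ (a = '1' ∧ b = '0') then
      (if t1 = t2 then some ('*' :: t1) else none)
    else if a = b then (pmMerge t1 t2).map (a :: ·)
    else none
  | _, _ => none

theorem pmMerge_none_of_len {l1 l2 : List Char} (h : l1.length ≠ l2.length) :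
    pmMerge l1 l2 = none := by
  induction l1 generalizing l2 with
  | nil => cases l2 <;> simp_all [pmMerge]
  | cons a t1 ih =>
    cases l2 with
    | nil => simp [pmMerge]
    | cons b t2 =>
      simp only [List.length_cons] at h
      have ht : t1.length ≠ t2.length := by omega
      have hne : t1 ≠ t2 := fun he => ht (by rw [he])
      simp [pmMerge, hne, ih ht]

theorem pre_take_drop (pre t1 : List Char) (a : Char) :
    ((pre ++ a :: t1).take pre.length = pre) ∧ ((pre ++ a :: t1).drop (pre.length + 1) = t1) := by
  constructor
  · exact List.take_left' rfl
  · have : pre ++ a :: t1 = (pre ++ [a]) ++ t1 := by simp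
    rw [this, List.drop_left' (by simp)]

theorem pmLoopA_eq (l1 l2 pre : List Char) (pi pj : String)
    (h1 : pi.toList = pre ++ l1) (h2 : pj.toList = pre ++ l2) :
    pmLoopA pi pj (PySem.List.enumerate (l1.zip l2) (pre.length : Int)) =
      (pmMerge l1 l2).map (fun t => String.ofList (pre ++ t)) := by
  induction l1 generalizing l2 pre with
  | nil => cases l2 <;> simp [pmMerge, pmLoopA]
  | cons a t1 ih =>
    cases l2 with
    | nil => simp [pmMerge, pmLoopA]
    | cons b t2 =>
      rw [List.zip_cons_cons, PySem.List.enumerate_cons, pmLoopA]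
      have hcast : (pre.length : Int) + 1 = ((pre.length + 1 : Nat) : Int) := by push_cast; ring
      have hslice1 : PySem.List.slice pi.toList (some ((pre.length : Int) + 1)) none = t1 := by
        rw [hcast, PySem.List.slice_from_natCast, h1, (pre_take_drop pre t1 a).2]
      have hslice2 : PySem.List.slice pj.toList (some ((pre.length : Int) + 1)) none = t2 := by
        rw [hcast, PySem.List.slice_from_natCast, h2, (pre_take_drop pre t2 b).2]
      have htake : PySem.List.slice pi.toList none (some (pre.length : Int)) = pre := by
        rw [PySem.List.slice_to_natCast, h1, (pre_take_drop pre t1 a).1]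
      by_cases h01 : (a = '0' ∧ b = '1') ∨ (a = '1' ∧ b = '0')
      · rcases h01 with ⟨ha, hb⟩ | ⟨ha, hb⟩ <;> subst ha <;> subst hb
        · rw [if_neg (by decide : ¬ ('0' : Char) > '1')]
          simp only []
          rw [if_pos (by decide), hslice1, hslice2, htake]
          by_cases ht : t1 = t2
          · rw [if_pos ht, pmMerge]
            simp [ht]
          · rw [if_neg ht, pmMerge]
            simp [ht]
        · rw [if_pos (by decide : ('1' : Char) > '0')]
          simp only []
          rw [if_pos (by decide), hslice1, hslice2, htake]
          by_cases ht : t1 = t2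
          · rw [if_pos ht, pmMerge]
            simp [ht]
          · rw [if_neg ht, pmMerge]
            simp [ht]
      · by_cases hab : a = b
        · subst hab
          rw [if_neg (lt_irrefl a)]
          simp only []
          rw [if_neg (by rintro ⟨h0, h1'⟩; rw [h0] at h1'; exact absurd h1' (by decide)),
              if_neg (by simp)]
          have hih := ih t2 (pre ++ [a]) (by simpa using h1) (by simpa using h2)
          simp only [List.length_append, List.length_cons, List.length_nil] at hih
          push_cast at hih
          rw [hih, pmMerge, if_neg h01, if_pos rfl]
          simp [Option.map_map, Function.comp_def]
        · have hmerge : pmMerge (a :: t1) (b :: t2) = none := by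
            rw [pmMerge, if_neg h01, if_neg hab]
          rw [hmerge]
          by_cases hgt : a > b
          · rw [if_pos hgt]
            simp only []
            rw [if_neg (by rintro ⟨h0, h1'⟩; exact h01 (Or.inr ⟨h1', h0⟩)),
                if_pos (fun h => hab h.symm)]
            rfl
          · rw [if_neg hgt]
            simp only []
            rw [if_neg (by rintro ⟨h0, h1'⟩; exact h01 (Or.inl ⟨h0, h1'⟩)),
                if_pos hab]
            rfl

theorem pmDiffs_nil_iff (t1 : List Char) : ∀ (t2 : List Char) (s : Int),
    t1.length = t2.length →
    ((PySem.List.enumerate (t1.zip t2) s).filter (fun x => x.2.1 ≠ x.2.2) = [] ↔ t1 = t2) := by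
  induction t1 with
  | nil => intro t2 s h; cases t2 <;> simp_all
  | cons c t1 ih =>
    intro t2 s h
    cases t2 with
    | nil => simp at h
    | cons d t2 =>
      rw [List.zip_cons_cons, PySem.List.enumerate_cons]
      by_cases hcd : c = d
      · subst hcd
        rw [List.filter_cons_of_neg (by simp)]
        rw [ih t2 (s + 1) (by simpa using h)]
        simp
      · rw [List.filter_cons_of_pos (by simpa using hcd)]
        simp [hcd]

theorem pmFinishB_eq (l1 : List Char) : ∀ (l2 pre : List Char) (pi : String),
    pi.toList = pre ++ l1 → l1.length = l2.length →
    pmFinishB pi ((PySem.List.enumerate (l1.zip l2) (pre.length : Int)).filter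
        (fun x => x.2.1 ≠ x.2.2)) =
      (pmMerge l1 l2).map (fun t => String.ofList (pre ++ t)) := by
  induction l1 with
  | nil =>
    intro l2 pre pi h1 hlen
    cases l2 with
    | nil => simp [pmFinishB, pmMerge]
    | cons b t2 => simp at hlen
  | cons a t1 ih =>
    intro l2 pre pi h1 hlen
    cases l2 with
    | nil => simp at hlen
    | cons b t2 =>
      have hlen' : t1.length = t2.length := by simpa using hlen
      rw [List.zip_cons_cons, PySem.List.enumerate_cons]
      have hcast : (pre.length : Int) + 1 = ((pre.length + 1 : Nat) : Int) := by push_cast; ring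
      have hslice1 : PySem.List.slice pi.toList (some ((pre.length : Int) + 1)) none = t1 := by
        rw [hcast, PySem.List.slice_from_natCast, h1, (pre_take_drop pre t1 a).2]
      have htake : PySem.List.slice pi.toList none (some (pre.length : Int)) = pre := by
        rw [PySem.List.slice_to_natCast, h1, (pre_take_drop pre t1 a).1]
      by_cases hab : a = b
      · subst hab
        rw [List.filter_cons_of_neg (by simp)]
        have hih := ih t2 (pre ++ [a]) pi (by simpa using h1) hlen'
        simp only [List.length_append, List.length_cons, List.length_nil] at hih
        push_cast at hih
        rw [hih, pmMerge,
            if_neg (by rintro (⟨h0, h1'⟩ | ⟨h0, h1'⟩) <;> (rw [h0] at h1'; exact absurd h1' (by decide))),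
            if_pos rfl]
        simp [Option.map_map, Function.comp_def]
      · rw [List.filter_cons_of_pos (by simpa using hab)]
        by_cases ht : t1 = t2
        · have hd : (PySem.List.enumerate (t1.zip t2) ((pre.length : Int) + 1)).filter
              (fun x => x.2.1 ≠ x.2.2) = [] :=
            (pmDiffs_nil_iff t1 t2 _ hlen').mpr ht
          rw [hd]
          rw [pmFinishB]
          simp only [List.length_cons, List.length_nil, List.head?_cons]
          rw [if_neg (by simp)]
          rw [pmMerge]
          by_cases h01 : (a = '0' ∧ b = '1') ∨ (a = '1' ∧ b = '0')
          · rw [if_pos h01, if_pos ht]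
            have h01' : ((a, b).1 = '0' ∧ (a, b).2 = '1') ∨ ((a, b).1 = '1' ∧ (a, b).2 = '0') := h01
            rw [if_pos h01', hslice1, htake]
            simp
          · rw [if_neg h01, if_neg hab]
            have h01' : ¬ (((a, b).1 = '0' ∧ (a, b).2 = '1') ∨ ((a, b).1 = '1' ∧ (a, b).2 = '0')) := h01
            rw [if_neg h01']
            rfl
        · have hd : (PySem.List.enumerate (t1.zip t2) ((pre.length : Int) + 1)).filter
              (fun x => x.2.1 ≠ x.2.2) ≠ [] :=
            fun he => ht ((pmDiffs_nil_iff t1 t2 _ hlen').mp he)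
          have hne : (List.filter (fun x => decide (x.2.1 ≠ x.2.2))
              (PySem.List.enumerate (t1.zip t2) ((pre.length : Int) + 1))).length ≠ 0 :=
            fun h0 => hd (List.length_eq_zero_iff.mp h0)
          rw [pmFinishB]
          rw [if_pos (by simp only [List.length_cons]; omega)]
          rw [pmMerge]
          by_cases h01 : (a = '0' ∧ b = '1') ∨ (a = '1' ∧ b = '0')
          · rw [if_pos h01, if_neg ht]; rfl
          · rw [if_neg h01, if_neg hab]; rfl

-- ===== VERDICT (by name: the statement is the Claim_ definition above) =====
theorem patterns_mergeable_spec : Claim_equal_patterns_mergeable := by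
  intro pi pj _
  unfold Spec_patterns_mergeable patterns_mergeable patterns_mergeable_alt
  have hA := pmLoopA_eq pi.toList pj.toList [] pi pj (by simp) (by simp)
  simp only [List.length_nil, Int.natCast_zero] at hA
  rw [hA]
  by_cases hlen : pi.toList.length = pj.toList.length
  · have hB := pmFinishB_eq pi.toList pj.toList [] pi (by simp) hlen
    simp only [List.length_nil, Int.natCast_zero] at hB
    rw [hB]
    have hl : ¬ PySem.Str.len pi ≠ PySem.Str.len pj := by
      simp only [PySem.Str.len_eq, ne_eq, hlen, not_true_eq_false,
        not_false_eq_true]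
    rw [if_neg hl]
  · have hl : PySem.Str.len pi ≠ PySem.Str.len pj := by
      simp only [PySem.Str.len_eq, ne_eq, Nat.cast_inj]
      exact hlen
    rw [if_pos hl, pmMerge_none_of_len hlen, Option.map_none]
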